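-- pv_equiv track=rewrite | github.com/Sunty2K/9A1-2024-2025 | p493.py | check
-- ===== SOURCE A (Python) =====
-- def check(nums):
--     digit = [0]*15
--     cnt = 0
--     for num in nums:
--         for i in range(15):
--             digit[i] += num % 10
--             if digit[i] >= 10:
--                 return 0
--             num //= 10
--             if num == 0:
--                 cnt += 1
--                 break
--     return cnt
-- ===== SOURCE B (Python) =====
-- def check(nums):
--     # column-major: total of digit column i over all nums; 0 if any column total >= 10
--     for i in range(15):
--         if sum(n // 10 ** i % 10 for n in nums) >= 10:
--             return 0
--     return sum(1 for n in nums if 0 <= n < 10 ** 15)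
-- ===== Notes on version B (the rewrite author's own statement) =====
-- stated objective: alternative
-- what changed: Row-major mutation of a 15-slot digit array with early return and per-number break is replaced by a column-major scan: for each of the 15 digit positions compute the column total over all numbers at once (safe because digit contributions are non-negative, so a column total reaches 10 iff A's early exit fired), and the count is computed in closed form as the number of inputs n with 0 <= n < 10**15.
import Mathlib
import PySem

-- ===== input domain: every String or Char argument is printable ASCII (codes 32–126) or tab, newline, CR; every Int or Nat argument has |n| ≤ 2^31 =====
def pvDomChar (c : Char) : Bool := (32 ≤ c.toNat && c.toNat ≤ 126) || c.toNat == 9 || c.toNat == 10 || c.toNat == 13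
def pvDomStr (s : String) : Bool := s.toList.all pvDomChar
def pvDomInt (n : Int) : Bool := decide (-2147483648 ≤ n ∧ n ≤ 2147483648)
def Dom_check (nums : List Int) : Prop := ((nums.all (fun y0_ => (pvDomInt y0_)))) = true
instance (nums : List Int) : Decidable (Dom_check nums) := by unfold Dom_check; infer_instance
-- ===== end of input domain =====

-- B replaces A's row-major digit-array mutation with early exit by a column-major scan
-- (per-column total over all numbers, closed-form count of numbers with 0 <= n < 10^15);
-- same cost, a genuinely different decomposition (objective: alternative).

-- ===== PORT A =====
-- inner 'for i in range(15)' loop; returns none for 'return 0',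
-- some (digit, true) when the 'break' fired (cnt += 1), some (digit, false) otherwise
def checkInner (digit : List Int) (num : Int) (i : Nat) : Nat → Option (List Int × Bool)
  | 0 => some (digit, false)
  | f + 1 =>
    let v := digit.getD i 0 + PySem.Int.mod num 10
    let digit' := digit.set i v
    if 10 ≤ v then none
    else
      let num' := PySem.Int.floordiv num 10
      if num' = 0 then some (digit', true)
      else checkInner digit' num' (i + 1) f

-- outer 'for num in nums' loop carrying the digit array and cnt
def checkOuter (digit : List Int) (cnt : Int) : List Int → Int
  | [] => cnt
  | num :: rest =>
    match checkInner digit num 0 15 with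
    | none => 0
    | some (d, brk) => checkOuter d (if brk then cnt + 1 else cnt) rest

def check (nums : List Int) : Int := checkOuter (List.replicate 15 0) 0 nums

-- ===== PORT B =====
-- sum(n // 10**i % 10 for n in nums)
def colTotal (nums : List Int) (i : Nat) : Int :=
  (nums.map (fun n => PySem.Int.mod (PySem.Int.floordiv n ((10:Int) ^ i)) 10)).sum

-- for i in range(15): if colTotal >= 10: return 0; then closed-form count
def check_alt (nums : List Int) : Int :=
  if (List.range 15).any (fun i => decide (10 ≤ colTotal nums i)) then 0
  else ((nums.filter (fun n => decide (0 ≤ n ∧ n < (10:Int) ^ 15))).length : Int)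

-- ===== PRECONDITION & SPEC =====
def Spec_check (nums : List Int) (out : Int) : Prop := out = check_alt nums
instance (nums : List Int) (out : Int) : Decidable (Spec_check nums out) := by unfold Spec_check; infer_instance

-- ===== CLAIM (what is proved, stated in full; the proofs are below) =====
def Claim_equal_check : Prop := ∀ (nums : List Int), Dom_check nums → Spec_check nums (check nums)

-- ===== LEMMAS AND PROOFS =====

-- digit contributed by n to column i (exactly the summand of colTotal)
def dg (n : Int) (i : Nat) : Int := PySem.Int.mod (PySem.Int.floordiv n ((10:Int) ^ i)) 10

lemma pow10_pos (i : Nat) : (0:Int) < 10 ^ i := by positivity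

lemma fd_pow (n : Int) (i : Nat) :
    PySem.Int.floordiv n ((10:Int) ^ i) = n / 10 ^ i :=
  PySem.Int.floordiv_eq_ediv_of_pos (pow10_pos i)

lemma dg_eq (n : Int) (i : Nat) : dg n i = (n / 10 ^ i) % 10 := by
  rw [dg, fd_pow, PySem.Int.mod_eq_emod_of_pos (by norm_num)]

lemma dg_nonneg (n : Int) (i : Nat) : 0 ≤ dg n i := by
  rw [dg_eq]; exact Int.emod_nonneg _ (by norm_num)

lemma dg_zero_idx (n : Int) : dg n 0 = PySem.Int.mod n 10 := by
  simp [dg, pow_zero]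

lemma dg_shift (n : Int) (i : Nat) : dg (PySem.Int.floordiv n 10) i = dg n (i + 1) := by
  rw [dg_eq, dg_eq, PySem.Int.floordiv_eq_ediv_of_pos (by norm_num : (0:Int) < 10),
    Int.ediv_ediv_of_nonneg (by norm_num : (0:Int) ≤ 10), ← pow_succ']

lemma fd_pow_shift (n : Int) (k : Nat) :
    PySem.Int.floordiv (PySem.Int.floordiv n 10) ((10:Int) ^ k) =
      PySem.Int.floordiv n ((10:Int) ^ (k + 1)) := by
  rw [fd_pow, fd_pow, PySem.Int.floordiv_eq_ediv_of_pos (by norm_num : (0:Int) < 10),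
    Int.ediv_ediv_of_nonneg (by norm_num : (0:Int) ≤ 10), ← pow_succ']

lemma fd_zero_iff (n : Int) (k : Nat) :
    PySem.Int.floordiv n ((10:Int) ^ k) = 0 ↔ 0 ≤ n ∧ n < 10 ^ k := by
  rw [PySem.Int.floordiv_eq_iff_of_pos (pow10_pos k)]
  constructor <;> rintro ⟨h1, h2⟩ <;> constructor <;> omega

lemma fd_zero_mono {n : Int} {k k' : Nat} (h : PySem.Int.floordiv n ((10:Int) ^ k) = 0)
    (hk : k ≤ k') : PySem.Int.floordiv n ((10:Int) ^ k') = 0 := by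
  rw [fd_zero_iff] at h ⊢
  have : (10:Int) ^ k ≤ 10 ^ k' := pow_le_pow_right₀ (by norm_num) hk
  exact ⟨h.1, lt_of_lt_of_le h.2 this⟩

lemma dg_zero_of_brk {n : Int} {j i : Nat} (h : PySem.Int.floordiv n ((10:Int) ^ j) = 0)
    (hij : j ≤ i) : dg n i = 0 := by
  rw [dg, fd_zero_mono h hij]; decide

-- the full update the inner loop performs when it does not 'return 0':
-- add dg m j at position i+j for each j < f
def updDigits (d : List Int) (m : Int) (i : Nat) : Nat → List Int
  | 0 => d
  | f + 1 => updDigits (d.set i (d.getD i 0 + PySem.Int.mod m 10)) (PySem.Int.floordiv m 10) (i + 1) f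

lemma updDigits_length (f : Nat) : ∀ (d : List Int) (m : Int) (i : Nat),
    (updDigits d m i f).length = d.length := by
  induction f with
  | zero => intro d m i; rfl
  | succ f ih => intro d m i; rw [updDigits, ih]; simp

lemma getD_set_ne (l : List Int) (i j : Nat) (a : Int) (h : i ≠ j) :
    (l.set i a).getD j 0 = l.getD j 0 := by
  simp [List.getD, List.getElem?_set_ne h]

lemma getD_set_self (l : List Int) (i : Nat) (a : Int) (h : i < l.length) :
    (l.set i a).getD i 0 = a := by
  simp [List.getD, h]

lemma updDigits_getD (f : Nat) : ∀ (d : List Int) (m : Int) (i p : Nat), p < d.length →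
    (updDigits d m i f).getD p 0 =
      d.getD p 0 + (if i ≤ p ∧ p < i + f then dg m (p - i) else 0) := by
  induction f with
  | zero => intro d m i p _; rw [if_neg (by omega)]; show d.getD p 0 = _; ring
  | succ f ih =>
    intro d m i p hp
    rw [updDigits, ih _ _ _ _ (by simpa using hp)]
    rcases Nat.lt_trichotomy p i with h | h | h
    · rw [getD_set_ne _ _ _ _ (by omega)]
      rw [if_neg (by omega), if_neg (by omega)]
    · subst h
      rw [getD_set_self _ _ _ hp, if_neg (by omega), if_pos (by omega)]
      simp [dg_zero_idx]
    · rw [getD_set_ne _ _ _ _ (by omega)]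
      rcases Nat.lt_or_ge p (i + (f + 1)) with h2 | h2
      · rw [if_pos (by omega), if_pos (by omega)]
        have e : p - (i + 1) + 1 = p - i := by omega
        rw [dg_shift, e]
      · rw [if_neg (by omega), if_neg (by omega)]

-- characterisation of the inner loop
lemma inner_eq (f : Nat) : ∀ (i : Nat) (d : List Int) (m : Int), d.length = 15 →
    checkInner d m i f =
      if ∃ j, j < f ∧ 10 ≤ d.getD (i + j) 0 + dg m j ∧
          (∀ j' < j, PySem.Int.floordiv m ((10:Int) ^ (j' + 1)) ≠ 0)
      then none
      else some (updDigits d m i f,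
        decide (∃ j, j < f ∧ PySem.Int.floordiv m ((10:Int) ^ (j + 1)) = 0)) := by
  induction f with
  | zero =>
    intro i d m hd
    simp [checkInner, updDigits]
  | succ f ih =>
    intro i d m hd
    rw [checkInner]
    simp only []
    by_cases hbad : 10 ≤ d.getD i 0 + PySem.Int.mod m 10
    · rw [if_pos hbad, if_pos ⟨0, by omega, by rw [dg_zero_idx]; simpa using hbad, by omega⟩]
    · rw [if_neg hbad]
      by_cases hbrk : PySem.Int.floordiv m 10 = 0
      · rw [if_pos hbrk]
        have hbrk1 : PySem.Int.floordiv m ((10:Int) ^ 1) = 0 := by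
          simpa [pow_one] using hbrk
        rw [if_neg ?_, Option.some.injEq]
        · refine Prod.ext ?_ ?_
          · -- lists equal: extra updates add dg m j = 0 for j ≥ 1
            apply List.ext_getElem
            · rw [updDigits_length]; simp
            · intro p h1 h2
              have hplen : p < d.length := by
                have := updDigits_length (f + 1) d m i
                simp at h1; omega
              have hset : p < (d.set i (d.getD i 0 + PySem.Int.mod m 10)).length := by
                simpa using hplen
              have e1 : (d.set i (d.getD i 0 + PySem.Int.mod m 10)).getD p 0 =
                  (updDigits d m i (f + 1)).getD p 0 := by
                rw [updDigits_getD (f + 1) d m i p hplen]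
                rcases Nat.lt_trichotomy p i with h | h | h
                · rw [getD_set_ne _ _ _ _ (by omega), if_neg (by omega)]; ring
                · subst h
                  rw [getD_set_self _ _ _ hplen, if_pos (by omega)]
                  simp [dg_zero_idx]
                · rw [getD_set_ne _ _ _ _ (by omega)]
                  rcases Nat.lt_or_ge p (i + (f + 1)) with h2' | h2'
                  · rw [if_pos (by omega), dg_zero_of_brk hbrk1 (by omega)]; ring
                  · rw [if_neg (by omega)]; ring
              rw [← List.getD_eq_getElem _ 0 h1, ← List.getD_eq_getElem _ 0 h2]
              exact e1
          · symm
            rw [decide_eq_true_iff]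
            exact ⟨0, by omega, hbrk1⟩
        · -- no 'return 0' can fire: j = 0 is not bad, j ≥ 1 blocked by the break at 0
          rintro ⟨j, hj, hge, hall⟩
          rcases Nat.eq_zero_or_pos j with rfl | hjpos
          · rw [dg_zero_idx] at hge; simp only [Nat.add_zero] at hge; omega
          · exact hall 0 hjpos hbrk1
      · rw [if_neg hbrk]
        rw [ih (i + 1) _ (PySem.Int.floordiv m 10) (by simpa using hd)]
        have hcond : (∃ j, j < f ∧
            10 ≤ (d.set i (d.getD i 0 + PySem.Int.mod m 10)).getD (i + 1 + j) 0 +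
              dg (PySem.Int.floordiv m 10) j ∧
            (∀ j' < j, PySem.Int.floordiv (PySem.Int.floordiv m 10) ((10:Int) ^ (j' + 1)) ≠ 0)) ↔
            (∃ j, j < f + 1 ∧ 10 ≤ d.getD (i + j) 0 + dg m j ∧
            (∀ j' < j, PySem.Int.floordiv m ((10:Int) ^ (j' + 1)) ≠ 0)) := by
          constructor
          · rintro ⟨j, hj, hge, hall⟩
            refine ⟨j + 1, by omega, ?_, ?_⟩
            · rw [getD_set_ne _ _ _ _ (by omega)] at hge
              rw [dg_shift] at hge
              have : i + 1 + j = i + (j + 1) := by omega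
              rwa [this] at hge
            · intro j' hj'
              rcases Nat.eq_zero_or_pos j' with rfl | hj'pos
              · simpa [pow_one] using hbrk
              · have := hall (j' - 1) (by omega)
                rw [fd_pow_shift] at this
                have e : j' - 1 + 1 + 1 = j' + 1 := by omega
                rwa [e] at this
          · rintro ⟨j, hj, hge, hall⟩
            rcases Nat.eq_zero_or_pos j with rfl | hjpos
            · rw [dg_zero_idx] at hge; simp only [Nat.add_zero] at hge; omega
            refine ⟨j - 1, by omega, ?_, ?_⟩
            · rw [getD_set_ne _ _ _ _ (by omega), dg_shift]
              have e : i + 1 + (j - 1) = i + j := by omega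
              have e2 : j - 1 + 1 = j := by omega
              rw [e, e2]; exact hge
            · intro j' hj'
              rw [fd_pow_shift]
              exact hall (j' + 1) (by omega)
        have hbrkiff : (∃ j, j < f ∧
            PySem.Int.floordiv (PySem.Int.floordiv m 10) ((10:Int) ^ (j + 1)) = 0) ↔
            (∃ j, j < f + 1 ∧ PySem.Int.floordiv m ((10:Int) ^ (j + 1)) = 0) := by
          constructor
          · rintro ⟨j, hj, h⟩
            rw [fd_pow_shift] at h
            exact ⟨j + 1, by omega, h⟩
          · rintro ⟨j, hj, h⟩
            rcases Nat.eq_zero_or_pos j with rfl | hjpos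
            · exact absurd (by simpa [pow_one] using h) hbrk
            · refine ⟨j - 1, by omega, ?_⟩
              rw [fd_pow_shift]
              have e : j - 1 + 1 = j := by omega
              rw [e]; exact h
        rw [if_congr hcond rfl rfl, decide_eq_decide.mpr hbrkiff]
        rfl

lemma colTotal_nil (j : Nat) : colTotal [] j = 0 := rfl

lemma colTotal_cons (n : Int) (rest : List Int) (j : Nat) :
    colTotal (n :: rest) j = dg n j + colTotal rest j := rfl

lemma colTotal_nonneg (ns : List Int) (j : Nat) : 0 ≤ colTotal ns j := by
  induction ns with
  | nil => simp [colTotal_nil]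
  | cons n rest ih =>
    rw [colTotal_cons]
    have := dg_nonneg n j
    omega

lemma brkable_iff (n : Int) :
    (∃ j, j < 15 ∧ PySem.Int.floordiv n ((10:Int) ^ (j + 1)) = 0) ↔ (0 ≤ n ∧ n < 10 ^ 15) := by
  constructor
  · rintro ⟨j, hj, h⟩
    rw [fd_zero_iff] at h
    have : (10:Int) ^ (j + 1) ≤ 10 ^ 15 := pow_le_pow_right₀ (by norm_num) (by omega)
    exact ⟨h.1, lt_of_lt_of_le h.2 this⟩
  · intro h
    exact ⟨14, by omega, (fd_zero_iff n 15).mpr h⟩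

-- characterisation of the outer loop
lemma outer_eq (ns : List Int) : ∀ (d : List Int) (cnt : Int), d.length = 15 →
    (∀ p, p < 15 → 0 ≤ d.getD p 0 ∧ d.getD p 0 ≤ 9) →
    checkOuter d cnt ns =
      if ∃ j, j < 15 ∧ 10 ≤ d.getD j 0 + colTotal ns j then 0
      else cnt + ((ns.filter fun n => decide (0 ≤ n ∧ n < (10:Int) ^ 15)).length : Int) := by
  induction ns with
  | nil =>
    intro d cnt hd hinv
    rw [checkOuter, if_neg]
    · simp
    · rintro ⟨j, hj, hge⟩
      rw [colTotal_nil] at hge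
      have := hinv j hj
      omega
  | cons n rest ih =>
    intro d cnt hd hinv
    rw [checkOuter]
    rw [inner_eq 15 0 d n hd]
    by_cases hC : ∃ j, j < 15 ∧ 10 ≤ d.getD (0 + j) 0 + dg n j ∧
        (∀ j' < j, PySem.Int.floordiv n ((10:Int) ^ (j' + 1)) ≠ 0)
    · rw [if_pos hC]
      obtain ⟨j, hj, hge, _⟩ := hC
      rw [if_pos ⟨j, hj, by
        rw [colTotal_cons]
        have := colTotal_nonneg rest j
        simp only [Nat.zero_add] at hge
        omega⟩]
    · rw [if_neg hC]
      have hnotbad : ∀ j, j < 15 → 10 ≤ d.getD j 0 + dg n j →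
          ∃ j', j' < j ∧ PySem.Int.floordiv n ((10:Int) ^ (j' + 1)) = 0 := by
        intro j hj hge
        by_contra hno
        push Not at hno
        exact hC ⟨j, hj, by simpa using hge, fun j' hj' => hno j' hj'⟩
      have hgetD : ∀ p, p < 15 → (updDigits d n 0 15).getD p 0 = d.getD p 0 + dg n p := by
        intro p hp
        rw [updDigits_getD 15 d n 0 p (by omega), if_pos (by omega)]
        simp
      have hinv' : ∀ p, p < 15 → 0 ≤ (updDigits d n 0 15).getD p 0 ∧
          (updDigits d n 0 15).getD p 0 ≤ 9 := by
        intro p hp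
        rw [hgetD p hp]
        have h0 := dg_nonneg n p
        have h1 := (hinv p hp).1
        refine ⟨by omega, ?_⟩
        by_contra hgt
        obtain ⟨j', hj', hz⟩ := hnotbad p hp (by omega)
        have : dg n p = 0 := dg_zero_of_brk hz (by omega)
        have := (hinv p hp).2
        omega
      show checkOuter (updDigits d n 0 15)
          (if decide (∃ j, j < 15 ∧ PySem.Int.floordiv n ((10:Int) ^ (j + 1)) = 0) = true
            then cnt + 1 else cnt) rest = _
      rw [ih _ _ (by rw [updDigits_length]; exact hd) hinv']
      have hiff : (∃ j, j < 15 ∧ 10 ≤ (updDigits d n 0 15).getD j 0 + colTotal rest j) ↔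
          (∃ j, j < 15 ∧ 10 ≤ d.getD j 0 + colTotal (n :: rest) j) := by
        constructor <;> rintro ⟨j, hj, hge⟩ <;> refine ⟨j, hj, ?_⟩
        · rw [hgetD j hj] at hge; rw [colTotal_cons]; omega
        · rw [hgetD j hj]; rw [colTotal_cons] at hge; omega
      rw [if_congr hiff rfl rfl]
      by_cases hfin : ∃ j, j < 15 ∧ 10 ≤ d.getD j 0 + colTotal (n :: rest) j
      · rw [if_pos hfin, if_pos hfin]
      · rw [if_neg hfin, if_neg hfin]
        have hb : decide (∃ j, j < 15 ∧ PySem.Int.floordiv n ((10:Int) ^ (j + 1)) = 0) =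
            decide (0 ≤ n ∧ n < (10:Int) ^ 15) :=
          decide_eq_decide.mpr (brkable_iff n)
        rw [hb, List.filter_cons]
        by_cases hn : 0 ≤ n ∧ n < (10:Int) ^ 15
        · rw [decide_eq_true hn, if_pos rfl, if_pos rfl, List.length_cons]
          push_cast
          ring
        · rw [decide_eq_false hn, if_neg Bool.false_ne_true, if_neg Bool.false_ne_true]

-- ===== VERDICT (by name: the statement is the Claim_ definition above) =====
theorem check_spec : Claim_equal_check := by
  intro nums _
  unfold Spec_check check check_alt
  rw [outer_eq nums (List.replicate 15 0) 0 (by simp) (by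
    intro p hp
    norm_num [List.getD_eq_getElem?_getD, List.getElem?_replicate, hp])]
  have hrep : ∀ j : Nat, (List.replicate (15:Nat) (0:Int)).getD j 0 = 0 := by
    intro j
    rw [List.getD_eq_getElem?_getD, List.getElem?_replicate]
    split <;> rfl
  cases h : (List.range 15).any (fun i => decide (10 ≤ colTotal nums i)) with
  | true =>
    obtain ⟨i, hi, hle⟩ := List.any_eq_true.mp h
    rw [List.mem_range] at hi
    rw [if_pos ⟨i, hi, by rw [hrep i]; simpa using of_decide_eq_true hle⟩, if_pos rfl]
  | false =>
    have hnone : ¬∃ j, j < 15 ∧ 10 ≤ (List.replicate (15:Nat) (0:Int)).getD j 0 + colTotal nums j := by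
      rintro ⟨j, hj, hge⟩
      have hall := List.any_eq_false.mp h j (List.mem_range.mpr hj)
      rw [hrep j] at hge
      exact absurd (decide_eq_true (by simpa using hge)) (by simpa using hall)
    rw [if_neg hnone, if_neg Bool.false_ne_true]
    simp
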